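-- pv_equiv track=rewrite | github.com/ijo0r98/codingtest | programmers/v1/Stack&Queue/주식가격.py | solution
-- ===== SOURCE A (Python) =====
-- def solution(prices):
--     answer = []
--     time = 0
--     length = len(prices)
--
--     for i in range(length):
--         time = 0
--         for j in range(i+1, length):
--             if prices[i] > prices[j]:
--                 break
--         answer.append(j-i)
--
--     return answer
-- ===== SOURCE B (Python) =====
-- def solution(prices):
--     # Monotonic stack of indices: pop on a price drop to assign durations in O(n).
--     n = len(prices)
--     answer = [0] * n
--     stack = []  # indices still waiting for a drop; prices non-increasing top->bottom
--     for j in range(n):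
--         while stack and prices[stack[-1]] > prices[j]:
--             i = stack.pop()
--             answer[i] = j - i
--         stack.append(j)
--     for i in stack:
--         answer[i] = n - 1 - i
--     return answer
-- ===== Notes on version B (the rewrite author's own statement) =====
-- stated objective: faster
-- what changed: Replaced the per-index forward rescan (for each i, scan j=i+1.. until a lower price) by a single left-to-right pass with a monotonic stack of pending indices, popping on each price drop to assign durations.
import Mathlib
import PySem

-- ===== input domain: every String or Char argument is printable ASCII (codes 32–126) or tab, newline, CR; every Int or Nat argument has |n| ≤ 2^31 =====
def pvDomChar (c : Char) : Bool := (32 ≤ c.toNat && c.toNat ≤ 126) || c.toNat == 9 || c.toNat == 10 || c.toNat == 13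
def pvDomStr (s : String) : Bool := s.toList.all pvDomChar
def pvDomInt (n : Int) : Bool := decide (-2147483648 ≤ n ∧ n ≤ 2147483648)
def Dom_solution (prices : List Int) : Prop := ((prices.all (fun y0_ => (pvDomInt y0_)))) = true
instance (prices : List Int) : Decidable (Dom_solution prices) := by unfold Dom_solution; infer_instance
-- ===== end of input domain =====

-- B replaces A's quadratic per-index rescan by a one-pass monotonic stack of indices (asymptotically faster, O(n)).


-- ===== PORT A =====
-- inner 'for j in range(i+1, length): if prices[i] > prices[j]: break'; carries the
-- leftover value of j (jprev) which Python keeps when the range is empty.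
def innerA (p : List Int) (pi : Int) : List Int → Int → Int
  | [], jprev => jprev
  | j :: rest, _ =>
      if pi > PySem.List.pyGetD p j 0 then j else innerA p pi rest j

def solution (prices : List Int) : List Int :=
  let length : Int := prices.length
  ((PySem.List.pyRange 0 length 1).foldl
    (fun (st : List Int × Int) i =>
      let j := innerA prices (PySem.List.pyGetD prices i 0) (PySem.List.pyRange (i+1) length 1) st.2
      (st.1 ++ [j - i], j))
    ([], 0)).1

-- ===== PORT B =====
-- 'while stack and prices[stack[-1]] > prices[j]: i = stack.pop(); answer[i] = j - i'
-- stack is held head = top (Python appends/pops at the end); returns (stack, answer).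
def popLoop (p : List Int) (j : Int) : List Int → List Int → List Int × List Int
  | [], ans => ([], ans)
  | i :: rest, ans =>
      if PySem.List.pyGetD p i 0 > PySem.List.pyGetD p j 0 then
        popLoop p j rest (PySem.List.pySetD ans i (j - i))
      else (i :: rest, ans)

def solution_alt (prices : List Int) : List Int :=
  let n : Int := prices.length
  let st := (PySem.List.pyRange 0 n 1).foldl
    (fun (st : List Int × List Int) j =>
      let pr := popLoop prices j st.2 st.1
      (pr.2, j :: pr.1))
    (List.replicate prices.length 0, [])
  -- 'for i in stack:' iterates bottom→top, i.e. the reverse of our head = top list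
  st.2.reverse.foldl (fun ans i => PySem.List.pySetD ans i (n - 1 - i)) st.1

-- ===== PRECONDITION & SPEC =====
-- Pre_ excludes exactly the single-element lists, on which Python A raises NameError
-- (the inner loop never runs and j is unbound at answer.append).
def Pre_solution (prices : List Int) : Prop := prices.length ≠ 1
instance (prices : List Int) : Decidable (Pre_solution prices) := by unfold Pre_solution; infer_instance
def pvWitness_solution : List Int := [3, 1, 2]

def Spec_solution (prices : List Int) (out : List Int) : Prop := out = solution_alt prices
instance (prices : List Int) (out : List Int) : Decidable (Spec_solution prices out) := by unfold Spec_solution; infer_instance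

-- ===== CLAIM (what is proved, stated in full; the proofs are below) =====
def Claim_equal_solution : Prop := ∀ (prices : List Int), Dom_solution prices → Pre_solution prices → Spec_solution prices (solution prices)

-- ===== LEMMAS AND PROOFS =====

-- the common characterisation: jv p i = the first index j > i with p[i] > p[j], else n-1
def jv (p : List Int) (i : Nat) : Int :=
  ((PySem.List.pyRange ((i : Int) + 1) (p.length : Int) 1).find?
      (fun j => decide (PySem.List.pyGetD p (i : Int) 0 > PySem.List.pyGetD p j 0))).getD
    ((p.length : Int) - 1)

theorem innerA_eq (p : List Int) (pi : Int) : ∀ (js : List Int) (jp : Int),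
    innerA p pi js jp
      = ((js.find? (fun j => decide (pi > PySem.List.pyGetD p j 0))).getD (js.getLastD jp)) := by
  intro js
  induction js with
  | nil => intro jp; simp [innerA]
  | cons j rest ih =>
      intro jp
      by_cases h : pi > PySem.List.pyGetD p j 0
      · simp [innerA, h, List.find?]
      · rw [show innerA p pi (j :: rest) jp
              = if pi > PySem.List.pyGetD p j 0 then j else innerA p pi rest j from rfl,
            if_neg h, ih j, List.find?_cons_of_neg (by simpa using h), List.getLastD_cons]

theorem getLastD_pyRange (a b d : Int) (h : a < b) :
    (PySem.List.pyRange a b 1).getLastD d = b - 1 := by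
  have hb : b = (b - 1) + 1 := by ring
  rw [hb, PySem.List.pyRange_one_succ_right (by omega)]
  simp

theorem pyRange_pred (n : Int) : PySem.List.pyRange (n - 1) n 1 = [n - 1] := by
  have h := PySem.List.pyRange_one_singleton (n - 1)
  rw [sub_add_cancel] at h
  exact h

theorem jv_pred (p : List Int) (h : 2 ≤ p.length) :
    jv p (p.length - 2) = (p.length : Int) - 1 := by
  unfold jv
  have h1 : ((p.length - 2 : Nat) : Int) + 1 = (p.length : Int) - 1 := by omega
  rw [h1, pyRange_pred]
  simp [List.find?]
  split <;> simp

theorem innerA_jv (p : List Int) (k : Nat) (hk : k < p.length) :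
    innerA p (PySem.List.pyGetD p (k : Int) 0) (PySem.List.pyRange ((k : Int) + 1) (p.length : Int) 1)
        (if k = 0 then 0 else jv p (k - 1)) = jv p k := by
  rw [innerA_eq]
  by_cases hlt : (k : Int) + 1 < (p.length : Int)
  · unfold jv
    rw [getLastD_pyRange _ _ _ hlt]
  · have hemp : PySem.List.pyRange ((k : Int) + 1) (p.length : Int) 1 = [] :=
      PySem.List.pyRange_one_eq_nil (by omega)
    have hjvk : jv p k = (p.length : Int) - 1 := by unfold jv; rw [hemp]; simp
    rw [hemp, hjvk]
    simp only [List.find?_nil, Option.getD_none, List.getLastD_nil]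
    by_cases hk0 : k = 0
    · subst hk0
      have : p.length = 1 := by omega
      simp [this]
    · rw [if_neg hk0]
      have h2 : k - 1 = p.length - 2 := by omega
      rw [h2, jv_pred p (by omega)]

theorem A_loop (p : List Int) : ∀ (k : Nat), k ≤ p.length →
    (PySem.List.pyRange 0 (k : Int) 1).foldl
      (fun (st : List Int × Int) i =>
        (st.1 ++ [innerA p (PySem.List.pyGetD p i 0) (PySem.List.pyRange (i+1) (p.length : Int) 1) st.2 - i],
         innerA p (PySem.List.pyGetD p i 0) (PySem.List.pyRange (i+1) (p.length : Int) 1) st.2))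
      ([], 0)
    = ((List.range k).map (fun i => jv p i - i), if k = 0 then 0 else jv p (k - 1)) := by
  intro k
  induction k with
  | zero => intro _; simp [PySem.List.pyRange_one_eq_nil]
  | succ k ih =>
      intro hk
      have hsplit : PySem.List.pyRange 0 ((k + 1 : Nat) : Int) 1
          = PySem.List.pyRange 0 (k : Int) 1 ++ [(k : Int)] := by
        push_cast
        exact PySem.List.pyRange_one_succ_right (by omega)
      rw [hsplit, List.foldl_append, ih (by omega)]
      simp only [List.foldl_cons, List.foldl_nil]
      rw [innerA_jv p k (by omega)]
      simp [List.range_succ]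

theorem solution_eq_map (p : List Int) :
    solution p = (List.range p.length).map (fun i => jv p i - i) := by
  simp only [solution]
  rw [A_loop p p.length le_rfl]

theorem jv_of_drop (p : List Int) (i k : Nat) (hik : i < k) (hk : k < p.length)
    (hno : ∀ j' : Int, (i : Int) < j' → j' < (k : Int) →
      PySem.List.pyGetD p (i : Int) 0 ≤ PySem.List.pyGetD p j' 0)
    (hbr : PySem.List.pyGetD p (i : Int) 0 > PySem.List.pyGetD p (k : Int) 0) :
    jv p i = (k : Int) := by
  unfold jv
  rw [PySem.List.pyRange_one_append ((i : Int) + 1) (k : Int) (p.length : Int) (by omega) (by omega),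
    List.find?_append]
  have h1 : (PySem.List.pyRange ((i : Int) + 1) (k : Int) 1).find?
      (fun j => decide (PySem.List.pyGetD p (i : Int) 0 > PySem.List.pyGetD p j 0)) = none := by
    rw [List.find?_eq_none]
    intro j hj
    rw [PySem.List.mem_pyRange_one] at hj
    simpa using not_lt.mpr (hno j (by omega) (by omega))
  rw [h1, PySem.List.pyRange_one_cons (by exact_mod_cast hk), List.find?_cons_of_pos (by simpa using hbr)]
  rfl

theorem jv_of_nodrop (p : List Int) (i : Nat)
    (hno : ∀ j' : Int, (i : Int) < j' → j' < (p.length : Int) →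
      PySem.List.pyGetD p (i : Int) 0 ≤ PySem.List.pyGetD p j' 0) :
    jv p i = (p.length : Int) - 1 := by
  unfold jv
  have h1 : (PySem.List.pyRange ((i : Int) + 1) (p.length : Int) 1).find?
      (fun j => decide (PySem.List.pyGetD p (i : Int) 0 > PySem.List.pyGetD p j 0)) = none := by
    rw [List.find?_eq_none]
    intro j hj
    rw [PySem.List.mem_pyRange_one] at hj
    simpa using not_lt.mpr (hno j (by omega) (by omega))
  rw [h1]
  rfl

-- stack invariants
def StackInv (p : List Int) (k : Nat) (s : List Nat) : Prop :=
  (∀ i ∈ s, i < k) ∧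
  s.Pairwise (fun (a b : Nat) => b < a ∧ PySem.List.pyGetD p (b : Int) 0 ≤ PySem.List.pyGetD p (a : Int) 0) ∧
  (∀ i ∈ s, ∀ j' : Int, (i : Int) < j' → j' < (k : Int) →
    PySem.List.pyGetD p (i : Int) 0 ≤ PySem.List.pyGetD p j' 0)

def AnsInv (p : List Int) (k : Nat) (s : List Nat) (ans : List Int) : Prop :=
  ans.length = p.length ∧
  ∀ i : Nat, i < k → i ∉ s → ans.getD i 0 = jv p i - i

theorem getD_set_self (l : List Int) (i : Nat) (v : Int) (h : i < l.length) :
    (l.set i v).getD i 0 = v := by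
  rw [List.getD_eq_getElem _ _ (by simpa using h)]
  simp [List.getElem_set_self]

theorem getD_set_ne (l : List Int) (i j : Nat) (v : Int) (h : j ≠ i) :
    (l.set j v).getD i 0 = l.getD i 0 := by
  simp [List.getD, List.getElem?_set_ne h]

theorem popLoop_spec (p : List Int) (k : Nat) (hk : k < p.length) :
    ∀ (s : List Nat) (ans : List Int), StackInv p k s → AnsInv p k s ans →
    ∃ s' ans',
      popLoop p (k : Int) (s.map (fun x : Nat => (x : Int))) ans = (s'.map (fun x : Nat => (x : Int)), ans') ∧
      StackInv p (k + 1) (k :: s') ∧ AnsInv p (k + 1) (k :: s') ans' := by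
  intro s
  induction s with
  | nil =>
      intro ans hS hA
      refine ⟨[], ans, rfl, ⟨by simp, by simp, ?_⟩, hA.1, ?_⟩
      · intro x hx j' h1 h2
        simp only [List.mem_singleton] at hx
        subst hx
        omega
      · intro i' hi' hmem'
        have hne : i' ≠ k := by intro h; exact hmem' (by simp [h])
        exact hA.2 i' (by omega) (List.not_mem_nil)
  | cons i rest ih =>
      intro ans hS hA
      obtain ⟨hmem, hpw, hnd⟩ := hS
      rw [List.pairwise_cons] at hpw
      obtain ⟨hfirst, hpwrest⟩ := hpw
      by_cases hbr : PySem.List.pyGetD p (i : Int) 0 > PySem.List.pyGetD p (k : Int) 0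
      · -- pop i: it drops exactly at k
        have hstep : popLoop p (k : Int) ((i :: rest).map (fun x : Nat => (x : Int))) ans
            = popLoop p (k : Int) (rest.map (fun x : Nat => (x : Int)))
                (PySem.List.pySetD ans (i : Int) ((k : Int) - (i : Int))) := by
          simp only [List.map_cons, popLoop, if_pos hbr]
        have hikk : i < k := hmem i (by simp)
        have hjvi : jv p i = (k : Int) :=
          jv_of_drop p i k hikk hk (fun j' h1 h2 => hnd i (by simp) j' h1 h2) hbr
        have hA2 : AnsInv p k rest (PySem.List.pySetD ans (i : Int) ((k : Int) - (i : Int))) := by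
          refine ⟨by rw [PySem.List.pySetD_natCast]; simpa using hA.1, ?_⟩
          intro i' hi' hmem'
          rw [PySem.List.pySetD_natCast]
          by_cases hii : i' = i
          · subst hii
            rw [getD_set_self _ _ _ (by rw [hA.1]; omega), hjvi]
          · rw [getD_set_ne _ _ _ _ (Ne.symm hii)]
            exact hA.2 i' hi' (by simp [hmem', hii])
        have hS2 : StackInv p k rest :=
          ⟨fun x hx => hmem x (by simp [hx]), hpwrest,
           fun x hx => hnd x (by simp [hx])⟩
        obtain ⟨s', ans', heq, hS', hA'⟩ := ih _ hS2 hA2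
        exact ⟨s', ans', by rw [hstep, heq], hS', hA'⟩
      · -- stop: stack survives
        have hstep : popLoop p (k : Int) ((i :: rest).map (fun x : Nat => (x : Int))) ans
            = ((i :: rest).map (fun x : Nat => (x : Int)), ans) := by
          simp only [List.map_cons, popLoop, if_neg hbr]
        have hle : PySem.List.pyGetD p (i : Int) 0 ≤ PySem.List.pyGetD p (k : Int) 0 := not_lt.mp hbr
        have hleall : ∀ x ∈ i :: rest, x < k ∧
            PySem.List.pyGetD p (x : Int) 0 ≤ PySem.List.pyGetD p (k : Int) 0 := by
          intro x hx
          rcases List.mem_cons.mp hx with h | h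
          · subst h; exact ⟨hmem x (by simp), hle⟩
          · exact ⟨hmem x (by simp [h]), le_trans (hfirst x h).2 hle⟩
        refine ⟨i :: rest, ans, hstep, ⟨?_, ?_, ?_⟩, hA.1, ?_⟩
        · intro x hx
          rcases List.mem_cons.mp hx with h | h
          · omega
          · exact lt_trans ((hleall x (by simp [h])).1) (by omega)
        · rw [List.pairwise_cons]
          exact ⟨hleall, List.pairwise_cons.mpr ⟨hfirst, hpwrest⟩⟩
        · intro x hx j' h1 h2
          rcases List.mem_cons.mp hx with h | h
          · subst h; omega
          · by_cases hj : j' < (k : Int)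
            · exact hnd x h j' h1 hj
            · have hjk : j' = (k : Int) := by omega
              rw [hjk]
              exact (hleall x h).2
        · intro i' hi' hmem'
          have h1 : i' ≠ k := by intro h; exact hmem' (by simp [h])
          have h2 : i' ∉ i :: rest := by intro h; exact hmem' (by simp [h])
          exact hA.2 i' (by omega) h2

theorem B_loop (p : List Int) : ∀ (k : Nat), k ≤ p.length →
    ∃ s ans,
      (PySem.List.pyRange 0 (k : Int) 1).foldl
        (fun (st : List Int × List Int) j =>
          ((popLoop p j st.2 st.1).2, j :: (popLoop p j st.2 st.1).1))
        (List.replicate p.length 0, [])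
      = (ans, s.map (fun x : Nat => (x : Int))) ∧ StackInv p k s ∧ AnsInv p k s ans := by
  intro k
  induction k with
  | zero =>
      intro _
      refine ⟨[], List.replicate p.length 0, ?_, ⟨by simp, by simp, by simp⟩, by simp, ?_⟩
      · simp [PySem.List.pyRange_one_eq_nil]
      · intro i hi
        omega
  | succ k ih =>
      intro hk
      have hsplit : PySem.List.pyRange 0 ((k + 1 : Nat) : Int) 1
          = PySem.List.pyRange 0 (k : Int) 1 ++ [(k : Int)] := by
        push_cast
        exact PySem.List.pyRange_one_succ_right (by omega)
      obtain ⟨s, ans, heq, hS, hA⟩ := ih (by omega)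
      obtain ⟨s', ans', heq2, hS', hA'⟩ := popLoop_spec p k (by omega) s ans hS hA
      refine ⟨k :: s', ans', ?_, hS', hA'⟩
      rw [hsplit, List.foldl_append, heq]
      simp only [List.foldl_cons, List.foldl_nil, heq2, List.map_cons]

theorem drain_spec : ∀ (t : List Nat) (ans : List Int) (n : Nat), ans.length = n →
    (∀ x ∈ t, x < n) →
    ((t.map (fun x : Nat => (x : Int))).foldl
        (fun a x => PySem.List.pySetD a x ((n : Int) - 1 - x)) ans).length = n ∧
    ∀ i : Nat, ((t.map (fun x : Nat => (x : Int))).foldl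
        (fun a x => PySem.List.pySetD a x ((n : Int) - 1 - x)) ans).getD i 0
      = if i ∈ t then (n : Int) - 1 - (i : Int) else ans.getD i 0 := by
  intro t
  induction t with
  | nil => intro ans n hlen _; simp [hlen]
  | cons x t ih =>
      intro ans n hlen hx
      have hxn : x < n := hx x (by simp)
      simp only [List.map_cons, List.foldl_cons, PySem.List.pySetD_natCast]
      obtain ⟨ih1, ih2⟩ := ih (ans.set x ((n : Int) - 1 - (x : Int))) n (by simpa using hlen)
        (fun y hy => hx y (by simp [hy]))
      refine ⟨ih1, ?_⟩
      intro i
      rw [ih2 i]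
      by_cases hit : i ∈ t
      · simp [hit]
      · by_cases hix : i = x
        · subst hix
          rw [getD_set_self _ _ _ (by omega)]
          simp [hit]
        · rw [getD_set_ne _ _ _ _ (Ne.symm hix)]
          simp [hit, hix]

theorem solution_alt_eq_map (p : List Int) :
    solution_alt p = (List.range p.length).map (fun i => jv p i - i) := by
  obtain ⟨s, ans, heq, hS, hA⟩ := B_loop p p.length le_rfl
  simp only [solution_alt]
  rw [heq, ← List.map_reverse]
  obtain ⟨hlen, hchar⟩ := drain_spec s.reverse ans p.length hA.1
    (fun x hx => hS.1 x (List.mem_reverse.mp hx))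
  apply List.ext_getElem (by rw [hlen]; simp)
  intro i h1 h2
  rw [← List.getD_eq_getElem _ 0 h1, hchar i, List.getElem_map, List.getElem_range]
  have hin : i < p.length := by rw [← hlen]; exact h1
  by_cases hmem : i ∈ s.reverse
  · rw [if_pos hmem]
    have hjv : jv p i = (p.length : Int) - 1 :=
      jv_of_nodrop p i (hS.2.2 i (List.mem_reverse.mp hmem))
    rw [hjv]
  · rw [if_neg hmem]
    exact hA.2 i hin (fun h => hmem (List.mem_reverse.mpr h))

-- ===== VERDICT (by name: the statement is the Claim_ definition above) =====
theorem solution_spec : Claim_equal_solution := by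
  intro p _ _
  unfold Spec_solution
  rw [solution_eq_map, solution_alt_eq_map]
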